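-- pv_equiv track=rewrite | github.com/noxuxgg/teoria-de-la-informacion-codigos | PRINCIPAL.py | ficticio
-- ===== SOURCE A (Python) =====
-- def ficticio(r, vector):
--     q = len(vector)
--     izq = 0
--     alfa = 0
--     while izq < q:
--         izq = r + alfa * (r - 1)
--         alfa += 1
--     return izq - q
-- ===== SOURCE B (Python) =====
-- def ficticio(r, vector):
--     # Closed form: izq grows as k*(r-1)+1; k = ceil((q-1)/(r-1)) steps suffice.
--     q = len(vector)
--     if q == 0:
--         return 0
--     if r >= q:
--         return r - q
--     k = -((1 - q) // (r - 1))
--     return k * (r - 1) + 1 - q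
-- ===== Notes on version B (the rewrite author's own statement) =====
-- stated objective: alternative
-- what changed: Replaced A's while loop that steps izq = r + alfa*(r-1) until it reaches len(vector) by a closed form using ceiling division k = ceil((q-1)/(r-1)); in practice len() dominates, so the measured time is the same.
import Mathlib
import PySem

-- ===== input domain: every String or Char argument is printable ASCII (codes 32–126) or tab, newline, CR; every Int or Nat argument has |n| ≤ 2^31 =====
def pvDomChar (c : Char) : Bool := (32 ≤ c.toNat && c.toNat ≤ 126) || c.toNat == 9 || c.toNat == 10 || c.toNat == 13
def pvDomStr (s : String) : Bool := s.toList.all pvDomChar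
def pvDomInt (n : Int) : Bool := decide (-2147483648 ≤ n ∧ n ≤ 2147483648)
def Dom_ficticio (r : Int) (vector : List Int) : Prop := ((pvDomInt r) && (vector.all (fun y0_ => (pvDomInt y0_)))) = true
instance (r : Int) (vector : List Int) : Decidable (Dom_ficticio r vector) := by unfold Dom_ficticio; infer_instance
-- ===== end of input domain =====

-- B computes the loop's result in closed form via ceiling division instead of iterating.

-- ===== PORT A =====
-- the while loop of A; fuel only makes it total (inside Pre_ it never runs out)
def ficticioLoop (r q : Int) : Nat → Int → Int → Int
  | 0, izq, _ => izq
  | fuel + 1, izq, alfa =>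
    if izq < q then ficticioLoop r q fuel (r + alfa * (r - 1)) (alfa + 1) else izq

def ficticio (r : Int) (vector : List Int) : Int :=
  let q : Int := vector.length
  ficticioLoop r q (vector.length + 1) 0 0 - q

-- ===== PORT B =====
def ficticio_alt (r : Int) (vector : List Int) : Int :=
  let q : Int := vector.length
  if q = 0 then 0
  else if r ≥ q then r - q
  else
    let k := -(PySem.Int.floordiv (1 - q) (r - 1))
    k * (r - 1) + 1 - q

-- ===== PRECONDITION & SPEC =====
-- Pre_ excludes exactly the inputs on which A's while loop never terminates
-- (nonempty vector with r < 2 and r < len(vector)).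
def Pre_ficticio (r : Int) (vector : List Int) : Prop :=
  vector = [] ∨ (vector.length : Int) ≤ r ∨ 2 ≤ r
instance (r : Int) (vector : List Int) : Decidable (Pre_ficticio r vector) := by
  unfold Pre_ficticio; infer_instance

def pvWitness_ficticio : Int × List Int := (2, [5, 5, 5, 5, 5])

def Spec_ficticio (r : Int) (vector : List Int) (out : Int) : Prop := out = ficticio_alt r vector
instance (r : Int) (vector : List Int) (out : Int) : Decidable (Spec_ficticio r vector out) := by unfold Spec_ficticio; infer_instance

-- ===== CLAIM (what is proved, stated in full; the proofs are below) =====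
def Claim_equal_ficticio : Prop := ∀ (r : Int) (vector : List Int), Dom_ficticio r vector → Pre_ficticio r vector → Spec_ficticio r vector (ficticio r vector)

-- ===== LEMMAS AND PROOFS =====

-- the loop returns izq as soon as the guard fails, whatever the fuel
lemma ficticioLoop_done (r q : Int) (fuel : Nat) (izq alfa : Int) (h : ¬ izq < q) :
    ficticioLoop r q (fuel + 1) izq alfa = izq := by
  simp [ficticioLoop, h]

-- loop invariant: from state (izq = alfa*(r-1)+1, alfa) with enough fuel, the
-- result is k*(r-1)+1 where k = ceil((q-1)/(r-1))
lemma ficticioLoop_inv (r q k : Int) (hr : 2 ≤ r)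
    (hk1 : (k - 1) * (r - 1) < q - 1) (hk2 : q - 1 ≤ k * (r - 1)) :
    ∀ (fuel : Nat) (alfa : Int), alfa ≤ k → k ≤ alfa + fuel →
      ficticioLoop r q (fuel + 1) (alfa * (r - 1) + 1) alfa = k * (r - 1) + 1 := by
  intro fuel
  induction fuel with
  | zero =>
    intro alfa h1 h2
    have : alfa = k := by omega
    subst this
    exact ficticioLoop_done r q 0 _ _ (by omega)
  | succ n ih =>
    intro alfa h1 h2
    by_cases hlt : alfa * (r - 1) + 1 < q
    · have halfa : alfa < k := by
        by_contra h
        have he : alfa = k := by omega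
        rw [he] at hlt; omega
      have : ficticioLoop r q (n + 1 + 1) (alfa * (r - 1) + 1) alfa
           = ficticioLoop r q (n + 1) (r + alfa * (r - 1)) (alfa + 1) := by
        simp [ficticioLoop, hlt]
      rw [this]
      have hre : r + alfa * (r - 1) = (alfa + 1) * (r - 1) + 1 := by ring
      rw [hre]
      exact ih (alfa + 1) (by omega) (by omega)
    · have : alfa = k := by
        rcases (by by_cases h : alfa ≤ k - 1
                   · exact Or.inl (mul_le_mul_of_nonneg_right h (by omega : (0:Int) ≤ r - 1))
                   · exact Or.inr (by omega) :
                 alfa * (r - 1) ≤ (k - 1) * (r - 1) ∨ k ≤ alfa) with h | h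
        · omega
        · omega
      subst this
      exact ficticioLoop_done r q _ _ _ hlt

-- closed form of the whole loop, for any sufficient fuel
lemma ficticioLoop_closed (r q : Int) (fuel : Nat) (hq : 1 ≤ q)
    (hfuel : q + 1 ≤ (fuel : Int)) (hpre : q ≤ r ∨ 2 ≤ r) :
    ficticioLoop r q fuel 0 0
      = if r ≥ q then r
        else (-(PySem.Int.floordiv (1 - q) (r - 1))) * (r - 1) + 1 := by
  obtain ⟨m, rfl⟩ : ∃ m, fuel = m + 2 := ⟨fuel - 2, by omega⟩
  have h0 : (0 : Int) < q := by omega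
  have hstep : ficticioLoop r q (m + 2) 0 0
      = ficticioLoop r q (m + 1) (r + 0 * (r - 1)) 1 := by
    simp [ficticioLoop, h0]
  by_cases hrq : r ≥ q
  · rw [hstep, show r + 0 * (r - 1) = r by ring,
        ficticioLoop_done r q m r 1 (by omega)]
    simp [hrq]
  · have hr2 : 2 ≤ r := by omega
    set k : Int := -(PySem.Int.floordiv (1 - q) (r - 1)) with hk
    have hkspec : (k - 1) * (r - 1) < q - 1 ∧ q - 1 ≤ k * (r - 1) := by
      refine (PySem.Int.neg_floordiv_neg_eq_iff_of_pos (a := q - 1) (b := r - 1)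
        (q := k) (by omega)).mp ?_
      rw [hk]; norm_num
    have hk1 : (1 : Int) ≤ k := by
      by_contra h
      have := mul_nonpos_of_nonpos_of_nonneg (show k ≤ 0 by omega)
        (show (0:Int) ≤ r - 1 by omega)
      omega
    have hkm : k ≤ 1 + (m : Int) := by
      have h2 : ¬ ((q - 1) ≤ k - 1) := by
        intro h
        have := mul_le_mul_of_nonneg_right h (show (0:Int) ≤ r - 1 by omega)
        have h1 : (q - 1) * 1 ≤ (q - 1) * (r - 1) :=
          mul_le_mul_of_nonneg_left (by omega) (by omega)
        omega
      omega
    rw [hstep, show r + 0 * (r - 1) = (1 : Int) * (r - 1) + 1 by ring,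
        ficticioLoop_inv r q k hr2 hkspec.1 hkspec.2 m 1 hk1 hkm]
    simp [hrq]

-- ===== VERDICT (by name: the statement is the Claim_ definition above) =====
theorem ficticio_spec : Claim_equal_ficticio := by
  intro r vector _ hpre
  unfold Spec_ficticio
  rcases vector with _ | ⟨v, vs⟩
  · simp [ficticio, ficticio_alt, ficticioLoop]
  · have hq1 : (1 : Int) ≤ ((v :: vs).length : Int) := by
      simp
    have hpre' : ((v :: vs).length : Int) ≤ r ∨ 2 ≤ r := by
      rcases hpre with h | h | h
      · exact absurd h (by simp)
      · exact Or.inl h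
      · exact Or.inr h
    simp only [ficticio, ficticio_alt]
    rw [ficticioLoop_closed r ((v :: vs).length : Int) ((v :: vs).length + 1) hq1
        (by push_cast; omega) hpre']
    split_ifs <;> omega
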